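-- pv_equiv track=rewrite | github.com/Natalia-sys777/learning_is_fun-dr_rainbow_proj | lessons/forms.py | _split_lines
-- ===== SOURCE A (Python) =====
-- def _split_lines(value):
--     if not value:
--         return []
--     if isinstance(value, (list, tuple)):
--         return [str(x).strip() for x in value if str(x).strip()]
--     raw = str(value).replace("\r\n", "\n").split("\n")
--     parts = []
--     for line in raw:
--         line = line.strip()
--         if not line:
--             continue
--         if ";" in line:
--             parts.extend([p.strip() for p in line.split(";") if p.strip()])
--         else:
--             parts.append(line)
--     return parts
-- ===== SOURCE B (Python) =====
-- def _split_lines(value):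
--     if not value:
--         return []
--     if isinstance(value, (list, tuple)):
--         return [str(x).strip() for x in value if str(x).strip()]
--     # single left-to-right scan: flush the current token at every '\n' or ';'
--     parts, cur = [], []
--     for ch in str(value).replace("\r\n", "\n"):
--         if ch == "\n" or ch == ";":
--             tok = "".join(cur).strip()
--             if tok:
--                 parts.append(tok)
--             cur = []
--         else:
--             cur.append(ch)
--     tok = "".join(cur).strip()
--     if tok:
--         parts.append(tok)
--     return parts
-- ===== Notes on version B (the rewrite author's own statement) =====
-- stated objective: alternative
-- what changed: A normalizes CRLF, splits the text into lines, then per line branches on whether a semicolon occurs and re-splits; B replaces that two-level split/branch control flow with a single left-to-right character scan that flushes the current stripped token at every newline or semicolon.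
import Mathlib
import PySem

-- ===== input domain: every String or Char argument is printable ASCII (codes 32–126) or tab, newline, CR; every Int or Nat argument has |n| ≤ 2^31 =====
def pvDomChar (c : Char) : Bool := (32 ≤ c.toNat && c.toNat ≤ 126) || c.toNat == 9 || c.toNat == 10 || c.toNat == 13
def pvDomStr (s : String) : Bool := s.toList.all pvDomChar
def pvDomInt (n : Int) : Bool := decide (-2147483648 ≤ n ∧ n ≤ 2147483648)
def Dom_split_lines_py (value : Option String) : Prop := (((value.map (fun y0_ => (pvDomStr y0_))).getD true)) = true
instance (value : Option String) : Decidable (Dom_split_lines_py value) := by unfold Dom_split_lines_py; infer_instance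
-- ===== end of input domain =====

-- B replaces A's two-level split (normalize CRLF, split into lines, per-line branch on ';' and re-split)
-- by a single left-to-right character scan that flushes a stripped token at every '\n' or ';'
-- (alternative decomposition, same asymptotic cost).


-- ===== PORT A =====
-- literal port of A; the isinstance(list/tuple) branch is unreachable for an Optional[str] argument
def split_lines_py (value : Option String) : List String :=
  match value with
  | none => []
  | some s =>
    if s.toList = [] then []          -- 'if not value'
    else
      let raw := PySem.Chars.splitOn (PySem.Chars.replace s.toList ['\r', '\n'] ['\n']) ['\n']
      let parts := raw.foldl (fun parts line =>
        let l := PySem.Chars.strip line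
        if l = [] then parts
        else if PySem.Chars.isIn [';'] l then
          parts ++ ((PySem.Chars.splitOn l [';']).filter
              (fun p => decide (PySem.Chars.strip p ≠ []))).map PySem.Chars.strip
        else parts ++ [l]) []
      parts.map String.ofList

-- ===== PORT B =====
-- literal port of B: one scan over the normalized characters, state = (parts, cur)
def split_lines_py_alt (value : Option String) : List String :=
  match value with
  | none => []
  | some s =>
    if s.toList = [] then []          -- 'if not value'
    else
      let fin := (PySem.Chars.replace s.toList ['\r', '\n'] ['\n']).foldl
        (fun (st : List (List Char) × List Char) ch =>
          if ch == '\n' || ch == ';' then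
            let tok := PySem.Chars.strip st.2
            (if tok ≠ [] then st.1 ++ [tok] else st.1, ([] : List Char))
          else (st.1, st.2 ++ [ch])) ([], [])
      let tok := PySem.Chars.strip fin.2
      (if tok ≠ [] then fin.1 ++ [tok] else fin.1).map String.ofList

-- ===== PRECONDITION & SPEC =====
def Spec_split_lines_py (value : Option String) (out : List String) : Prop := out = split_lines_py_alt value
instance (value : Option String) (out : List String) : Decidable (Spec_split_lines_py value out) := by unfold Spec_split_lines_py; infer_instance

-- ===== CLAIM (what is proved, stated in full; the proofs are below) =====
def Claim_equal_split_lines_py : Prop := ∀ (value : Option String), Dom_split_lines_py value → Spec_split_lines_py value (split_lines_py value)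

-- ===== LEMMAS AND PROOFS =====

-- split a char list at every delimiter recognized by q (Python ''.split style: empty tokens kept)
def pvSplitP (q : Char → Bool) : List Char → List (List Char)
  | [] => [[]]
  | c :: t =>
    if q c then [] :: pvSplitP q t
    else match pvSplitP q t with
      | [] => [[c]]
      | h :: r => (c :: h) :: r

-- apply f to the last element only
def pvMapLast (f : List Char → List Char) : List (List Char) → List (List Char)
  | [] => []
  | [x] => [f x]
  | x :: r => x :: pvMapLast f r

-- apply f to the head element only
def pvConsHead (f : List Char → List Char) : List (List Char) → List (List Char)
  | [] => []
  | h :: r => f h :: r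

-- strip every token, keep the non-empty ones (shared shape of both programs' output)
def pvEmit (X : List (List Char)) : List (List Char) :=
  (X.map PySem.Chars.strip).filter (fun x => decide (x ≠ []))

theorem pvSplitP_ne_nil (q : Char → Bool) (l : List Char) : pvSplitP q l ≠ [] := by
  induction l with
  | nil => simp [pvSplitP]
  | cons c t ih =>
    simp only [pvSplitP]
    split
    · simp
    · cases h : pvSplitP q t with
      | nil => simp
      | cons a b => simp

theorem splitOn_go_spec (c : Char) (l : List Char) : ∀ (fuel : Nat) (cur : List Char) (acc : List (List Char)),
    l.length ≤ fuel →
    PySem.Chars.splitOn.go [c] fuel l cur acc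
      = acc.reverse ++ (match pvSplitP (· == c) l with
          | [] => []
          | h :: r => (cur.reverse ++ h) :: r) := by
  induction l with
  | nil =>
    intro fuel cur acc _
    cases fuel <;> simp [PySem.Chars.splitOn.go, pvSplitP]
  | cons a t ih =>
    intro fuel cur acc hf
    cases fuel with
    | zero => simp at hf
    | succ f =>
      have hf' : t.length ≤ f := by simpa using hf
      simp only [PySem.Chars.splitOn.go, List.isPrefixOf]
      by_cases hac : c = a
      · subst hac
        simp only [beq_self_eq_true, Bool.true_and, if_pos]
        simp only [List.length_cons, List.length_nil, List.drop_succ_cons, List.drop_zero]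
        rw [ih f [] (cur.reverse :: acc) hf']
        cases h : pvSplitP (· == c) t with
        | nil => exact absurd h (pvSplitP_ne_nil _ _)
        | cons x r =>
          simp [pvSplitP, h]
      · have hb : (c == a) = false := by simp [hac]
        simp only [hb, Bool.false_and, if_neg Bool.false_ne_true]
        rw [ih f (a :: cur) acc hf']
        cases h : pvSplitP (· == c) t with
        | nil => exact absurd h (pvSplitP_ne_nil _ _)
        | cons x r =>
          have hne : (a == c) = false := by simp [Ne.symm hac]
          simp [pvSplitP, h, hne]

theorem splitOn_singleton (c : Char) (l : List Char) :
    PySem.Chars.splitOn l [c] = pvSplitP (· == c) l := by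
  rw [PySem.Chars.splitOn, splitOn_go_spec c l (l.length + 1) [] [] (by omega)]
  cases h : pvSplitP (· == c) l with
  | nil => exact absurd h (pvSplitP_ne_nil _ _)
  | cons x r => simp

theorem pvSplitP_or (p q : Char → Bool) (l : List Char) :
    pvSplitP (fun c => p c || q c) l = (pvSplitP p l).flatMap (pvSplitP q) := by
  induction l with
  | nil => simp [pvSplitP]
  | cons a t ih =>
    by_cases hp : p a = true
    · simp [pvSplitP, hp, ih]
    · replace hp : p a = false := by simpa using hp
      by_cases hq : q a = true
      · cases h : pvSplitP p t with
        | nil => exact absurd h (pvSplitP_ne_nil _ _)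
        | cons x r =>
          simp only [pvSplitP, hp, hq, Bool.false_or, if_true, h, ih, List.flatMap_cons]
          cases hx : pvSplitP q x with
          | nil => exact absurd hx (pvSplitP_ne_nil _ _)
          | cons y s => simp [pvSplitP, hq, hx]
      · replace hq : q a = false := by simpa using hq
        cases h : pvSplitP p t with
        | nil => exact absurd h (pvSplitP_ne_nil _ _)
        | cons x r =>
          simp only [pvSplitP, hp, hq, Bool.false_or, h, ih, List.flatMap_cons]
          cases hx : pvSplitP q x with
          | nil => exact absurd hx (pvSplitP_ne_nil _ _)
          | cons y s => simp [pvSplitP, hq, hx]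

theorem pvSplitP_no_delim (q : Char → Bool) (l : List Char) (h : ∀ c ∈ l, q c = false) :
    pvSplitP q l = [l] := by
  induction l with
  | nil => simp [pvSplitP]
  | cons a t ih =>
    have ha : q a = false := h a (by simp)
    rw [pvSplitP, if_neg (by simp [ha]), ih (fun c hc => h c (by simp [hc]))]

theorem pvSplitP_snoc_nondelim (q : Char → Bool) (a : Char) (xs : List Char) (hq : q a = false) :
    pvSplitP q (xs ++ [a]) = pvMapLast (· ++ [a]) (pvSplitP q xs) := by
  induction xs with
  | nil => simp [pvSplitP, hq, pvMapLast]
  | cons b t ih =>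
    by_cases hb : q b = true
    · cases h : pvSplitP q t with
      | nil => exact absurd h (pvSplitP_ne_nil _ _)
      | cons x r => simp [pvSplitP, hb, ih, h, pvMapLast]
    · replace hb : q b = false := by simpa using hb
      cases h : pvSplitP q t with
      | nil => exact absurd h (pvSplitP_ne_nil _ _)
      | cons x r =>
        simp only [List.cons_append, pvSplitP, hb, ih, h]
        cases r <;> simp [pvMapLast]

theorem mem_lstrip (c : Char) (l : List Char) (hc : c ∈ l) (hws : PySem.Chars.isspace c = false) :
    c ∈ PySem.Chars.lstrip l := by
  rw [PySem.Chars.lstrip]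
  rcases (List.mem_append.mp (by rw [List.takeWhile_append_dropWhile]; exact hc :
      c ∈ l.takeWhile PySem.Chars.isspace ++ l.dropWhile PySem.Chars.isspace)) with h | h
  · exact absurd (List.mem_takeWhile_imp h) (by simp [hws])
  · exact h

theorem mem_strip (c : Char) (l : List Char) (hc : c ∈ l) (hws : PySem.Chars.isspace c = false) :
    c ∈ PySem.Chars.strip l := by
  rw [PySem.Chars.strip, PySem.Chars.rstrip]
  have h := mem_lstrip c (PySem.Chars.lstrip l).reverse (by simpa using mem_lstrip c l hc hws) hws
  rw [PySem.Chars.lstrip] at h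
  simpa using h

theorem rstrip_snoc_ws (a : Char) (y : List Char) (h : PySem.Chars.isspace a = true) :
    PySem.Chars.rstrip (y ++ [a]) = PySem.Chars.rstrip y := by
  simp [PySem.Chars.rstrip, h]

theorem strip_snoc_ws (a : Char) (x : List Char) (h : PySem.Chars.isspace a = true) :
    PySem.Chars.strip (x ++ [a]) = PySem.Chars.strip x := by
  rw [PySem.Chars.strip, PySem.Chars.strip, PySem.Chars.lstrip, PySem.Chars.lstrip,
    List.dropWhile_append]
  split
  · rename_i hx
    rw [List.isEmpty_iff.mp hx]
    simp [h]
  · simp [PySem.Chars.rstrip, h]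

theorem strip_cons_ws (a : Char) (t : List Char) (h : PySem.Chars.isspace a = true) :
    PySem.Chars.strip (a :: t) = PySem.Chars.strip t := by
  simp [PySem.Chars.strip, PySem.Chars.lstrip, h]

theorem map_strip_mapLast_snoc_ws (a : Char) (X : List (List Char)) (h : PySem.Chars.isspace a = true) :
    (pvMapLast (· ++ [a]) X).map PySem.Chars.strip = X.map PySem.Chars.strip := by
  induction X with
  | nil => rfl
  | cons x r ih =>
    cases r with
    | nil => simp [pvMapLast, strip_snoc_ws a x h]
    | cons y s => simpa [pvMapLast] using ih

theorem map_strip_splitP_lstrip (q : Char → Bool) (l : List Char)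
    (hq : ∀ c, q c = true → PySem.Chars.isspace c = false) :
    (pvSplitP q (PySem.Chars.lstrip l)).map PySem.Chars.strip = (pvSplitP q l).map PySem.Chars.strip := by
  induction l with
  | nil => rfl
  | cons a t ih =>
    by_cases hws : PySem.Chars.isspace a = true
    · have hqa : q a = false := by
        by_contra hc
        exact absurd hws (by simp [hq a (by simpa using hc)])
      rw [show PySem.Chars.lstrip (a :: t) = PySem.Chars.lstrip t from by
        simp [PySem.Chars.lstrip, hws]]
      rw [ih]
      cases h : pvSplitP q t with
      | nil => exact absurd h (pvSplitP_ne_nil _ _)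
      | cons x r => simp [pvSplitP, hqa, h, strip_cons_ws a x hws]
    · rw [show PySem.Chars.lstrip (a :: t) = a :: t from by
        simp [PySem.Chars.lstrip, hws]]

theorem map_strip_splitP_rstrip (q : Char → Bool) (l : List Char)
    (hq : ∀ c, q c = true → PySem.Chars.isspace c = false) :
    (pvSplitP q (PySem.Chars.rstrip l)).map PySem.Chars.strip = (pvSplitP q l).map PySem.Chars.strip := by
  induction l using List.reverseRecOn with
  | nil => rfl
  | append_singleton xs a ih =>
    by_cases hws : PySem.Chars.isspace a = true
    · have hqa : q a = false := by
        by_contra hc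
        exact absurd hws (by simp [hq a (by simpa using hc)])
      rw [rstrip_snoc_ws a xs hws, ih, pvSplitP_snoc_nondelim q a xs hqa,
        map_strip_mapLast_snoc_ws a _ hws]
    · rw [show PySem.Chars.rstrip (xs ++ [a]) = xs ++ [a] from by
        simp [PySem.Chars.rstrip, hws]]

theorem map_strip_splitP_strip (q : Char → Bool) (l : List Char)
    (hq : ∀ c, q c = true → PySem.Chars.isspace c = false) :
    (pvSplitP q (PySem.Chars.strip l)).map PySem.Chars.strip = (pvSplitP q l).map PySem.Chars.strip := by
  rw [PySem.Chars.strip, map_strip_splitP_rstrip q _ hq, map_strip_splitP_lstrip q _ hq]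

theorem pvEmit_nil : pvEmit [] = [] := rfl

theorem pvEmit_cons (x : List Char) (X : List (List Char)) :
    pvEmit (x :: X) = (if PySem.Chars.strip x ≠ [] then [PySem.Chars.strip x] else []) ++ pvEmit X := by
  simp only [pvEmit, List.map_cons, List.filter_cons]
  split_ifs with h1 h2 <;> simp_all

theorem pvConsHead_nil_append (X : List (List Char)) :
    pvConsHead (([] : List Char) ++ ·) X = X := by
  cases X <;> simp [pvConsHead]

theorem pvEmit_flatMap (l : List (List Char)) (f : List Char → List (List Char)) :
    pvEmit (l.flatMap f) = l.flatMap (fun x => pvEmit (f x)) := by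
  unfold pvEmit
  rw [List.map_flatMap, List.filter_flatMap]

-- B's scan loop, characterized
theorem B_fold (l : List Char) : ∀ (parts : List (List Char)) (cur : List Char),
    (let fin := l.foldl (fun (st : List (List Char) × List Char) ch =>
          if ch == '\n' || ch == ';' then
            let tok := PySem.Chars.strip st.2
            (if tok ≠ [] then st.1 ++ [tok] else st.1, ([] : List Char))
          else (st.1, st.2 ++ [ch])) (parts, cur)
     (if PySem.Chars.strip fin.2 ≠ [] then fin.1 ++ [PySem.Chars.strip fin.2] else fin.1))
    = parts ++ pvEmit (pvConsHead (cur ++ ·) (pvSplitP (fun c => c == '\n' || c == ';') l)) := by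
  induction l with
  | nil =>
    intro parts cur
    simp only [List.foldl_nil, pvSplitP, pvConsHead, List.append_nil, pvEmit_cons, pvEmit_nil]
    split <;> simp
  | cons c t ih =>
    intro parts cur
    by_cases hd : (c == '\n' || c == ';') = true
    · simp only [List.foldl_cons, hd, if_pos]
      rw [ih _ []]
      rw [pvConsHead_nil_append]
      simp only [pvSplitP, hd, if_pos, pvConsHead, pvEmit_cons]
      split <;> simp_all
    · replace hd : (c == '\n' || c == ';') = false := by simpa using hd
      simp only [List.foldl_cons, hd, Bool.false_eq_true, if_false]
      rw [ih _ (cur ++ [c])]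
      cases h : pvSplitP (fun c => c == '\n' || c == ';') t with
      | nil => exact absurd h (pvSplitP_ne_nil _ _)
      | cons x r =>
        simp [pvSplitP, hd, h, pvConsHead]

-- A's loop body, per line: equal to the stripped non-empty tokens of the ';'-split of the raw line
theorem gA_eq (acc : List (List Char)) (line : List Char) :
    (let l := PySem.Chars.strip line
     if l = [] then acc
     else if PySem.Chars.isIn [';'] l then
       acc ++ ((PySem.Chars.splitOn l [';']).filter
           (fun p => decide (PySem.Chars.strip p ≠ []))).map PySem.Chars.strip
     else acc ++ [l])
    = acc ++ pvEmit (pvSplitP (· == ';') line) := by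
  have hqs : ∀ c : Char, (c == ';') = true → PySem.Chars.isspace c = false := by
    intro c hc
    rw [show c = ';' from by simpa using hc]
    decide
  simp only []
  by_cases h0 : PySem.Chars.strip line = []
  · rw [if_pos h0]
    have hnod : ∀ c ∈ line, (c == ';') = false := by
      intro c hc
      by_contra hx
      have hc' : c = ';' := by simpa using hx
      subst hc'
      exact h0.symm.trans_ne (List.ne_nil_of_mem (mem_strip ';' line hc (by decide))) rfl
    rw [pvSplitP_no_delim _ _ hnod, pvEmit_cons, pvEmit_nil, if_neg (by simpa using h0)]
    simp
  · rw [if_neg h0]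
    by_cases hmem : ';' ∈ PySem.Chars.strip line
    · have hin : PySem.Chars.isIn [';'] (PySem.Chars.strip line) = true := by
        rw [PySem.Chars.isIn_iff_infix, List.singleton_infix_iff]; exact hmem
      rw [if_pos hin, splitOn_singleton]
      have h2 : pvEmit (pvSplitP (· == ';') (PySem.Chars.strip line)) = pvEmit (pvSplitP (· == ';') line) := by
        unfold pvEmit
        rw [map_strip_splitP_strip _ _ hqs]
      rw [← h2]
      unfold pvEmit
      rw [List.filter_map]
      rfl
    · have hin : PySem.Chars.isIn [';'] (PySem.Chars.strip line) = false := by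
        rw [← Bool.not_eq_true, PySem.Chars.isIn_iff_infix, List.singleton_infix_iff]; exact hmem
      rw [if_neg (by simp [hin])]
      have hnod : ∀ c ∈ line, (c == ';') = false := by
        intro c hc
        by_contra hx
        have hc' : c = ';' := by simpa using hx
        subst hc'
        exact hmem (mem_strip ';' line hc (by decide))
      rw [pvSplitP_no_delim _ _ hnod, pvEmit_cons, pvEmit_nil, if_pos h0]
      simp

-- A's whole loop over the lines of r
theorem A_side (r : List Char) :
    (PySem.Chars.splitOn r ['\n']).foldl (fun parts line =>
        let l := PySem.Chars.strip line
        if l = [] then parts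
        else if PySem.Chars.isIn [';'] l then
          parts ++ ((PySem.Chars.splitOn l [';']).filter
              (fun p => decide (PySem.Chars.strip p ≠ []))).map PySem.Chars.strip
        else parts ++ [l]) []
    = pvEmit (pvSplitP (fun c => c == '\n' || c == ';') r) := by
  have h1 : (PySem.Chars.splitOn r ['\n']).foldl (fun parts line =>
        let l := PySem.Chars.strip line
        if l = [] then parts
        else if PySem.Chars.isIn [';'] l then
          parts ++ ((PySem.Chars.splitOn l [';']).filter
              (fun p => decide (PySem.Chars.strip p ≠ []))).map PySem.Chars.strip
        else parts ++ [l]) []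
      = (PySem.Chars.splitOn r ['\n']).foldl
          (fun parts line => parts ++ pvEmit (pvSplitP (· == ';') line)) [] := by
    apply PySem.List.foldl_congr_mem
    intro acc line _
    exact gA_eq acc line
  rw [h1, PySem.List.foldl_append_eq_flatMap, splitOn_singleton, List.nil_append,
    pvSplitP_or]
  exact (pvEmit_flatMap _ _).symm

-- B's whole scan of r
theorem B_side (r : List Char) :
    (let fin := r.foldl (fun (st : List (List Char) × List Char) ch =>
          if ch == '\n' || ch == ';' then
            let tok := PySem.Chars.strip st.2
            (if tok ≠ [] then st.1 ++ [tok] else st.1, ([] : List Char))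
          else (st.1, st.2 ++ [ch])) ([], [])
     (if PySem.Chars.strip fin.2 ≠ [] then fin.1 ++ [PySem.Chars.strip fin.2] else fin.1))
    = pvEmit (pvSplitP (fun c => c == '\n' || c == ';') r) := by
  rw [B_fold r [] [], pvConsHead_nil_append, List.nil_append]

theorem main_eq (value : Option String) : split_lines_py value = split_lines_py_alt value := by
  cases value with
  | none => rfl
  | some s =>
    simp only [split_lines_py, split_lines_py_alt]
    by_cases hs : s.toList = []
    · rw [if_pos hs, if_pos hs]
    · rw [if_neg hs, if_neg hs]
      rw [A_side, B_side]

-- ===== VERDICT (by name: the statement is the Claim_ definition above) =====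
theorem split_lines_py_spec : Claim_equal_split_lines_py := by
  intro value _
  unfold Spec_split_lines_py
  exact main_eq value
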